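-- pv_equiv track=rewrite | github.com/Weless/leetcode | python/树/1457. 二叉树中的伪回文路径.py | isFakePalindrome
-- ===== SOURCE A (Python) =====
-- def isFakePalindrome(path):
--     from collections import defaultdict
--     d = defaultdict(int)
--     for i in path:
--         d[i] +=1
--     count = 0
--     for v in d.values():
--         if v & 1:
--             count += 1
--         if count == 2:
--             return False
--     return True
-- ===== SOURCE B (Python) =====
-- def isFakePalindrome(path):
--     seen = set()
--     for i in path:
--         if i in seen:
--             seen.remove(i)
--         else:
--             seen.add(i)
--     return len(seen) <= 1
-- ===== Notes on version B (the rewrite author's own statement) =====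
-- stated objective: idiomatic
-- what changed: Replaces the count dictionary plus a second scan over its values with a single pass maintaining a parity set (toggle membership), returning len(seen) <= 1.
import Mathlib
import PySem

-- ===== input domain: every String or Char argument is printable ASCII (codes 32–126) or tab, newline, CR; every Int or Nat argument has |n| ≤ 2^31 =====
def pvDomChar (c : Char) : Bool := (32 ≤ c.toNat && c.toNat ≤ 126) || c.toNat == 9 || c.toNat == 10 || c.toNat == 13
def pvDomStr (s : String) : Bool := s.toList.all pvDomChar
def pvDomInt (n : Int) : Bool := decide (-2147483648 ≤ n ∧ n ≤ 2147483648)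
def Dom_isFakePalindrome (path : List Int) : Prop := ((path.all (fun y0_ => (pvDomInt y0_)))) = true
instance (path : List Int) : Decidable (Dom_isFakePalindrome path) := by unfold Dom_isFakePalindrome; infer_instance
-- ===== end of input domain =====

-- B replaces A's count-dict plus value-scan with one pass over a parity set; objective: idiomatic.

-- ===== PORT A =====
-- second loop of A: 'for v in d.values(): if v & 1: count += 1; if count == 2: return False'
def pvALoop : List Int → Int → Bool
  | [], _ => true
  | v :: vs, count =>
    let count := if PySem.Int.band v 1 ≠ 0 then count + 1 else count
    if count == 2 then false else pvALoop vs count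

def isFakePalindrome (path : List Int) : Bool :=
  -- d = defaultdict(int); for i in path: d[i] += 1
  let d := path.foldl (fun d i => d.modify i 0 (· + 1)) PySem.Dict.empty
  pvALoop d.values 0

-- ===== PORT B =====
-- 'if i in seen: seen.remove(i) else: seen.add(i)'  (remove under the membership guard = discard, exact)
def pvToggle (s : PySem.Set Int) (i : Int) : PySem.Set Int :=
  if PySem.Set.contains s i then PySem.Set.discard s i else PySem.Set.add s i

def isFakePalindrome_alt (path : List Int) : Bool :=
  let seen := path.foldl pvToggle PySem.Set.empty
  decide (PySem.Set.len seen ≤ 1)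

-- ===== PRECONDITION & SPEC =====
def Spec_isFakePalindrome (path : List Int) (out : Bool) : Prop := out = isFakePalindrome_alt path
instance (path : List Int) (out : Bool) : Decidable (Spec_isFakePalindrome path out) := by unfold Spec_isFakePalindrome; infer_instance

-- ===== CLAIM (what is proved, stated in full; the proofs are below) =====
def Claim_equal_isFakePalindrome : Prop := ∀ (path : List Int), Dom_isFakePalindrome path → Spec_isFakePalindrome path (isFakePalindrome path)

-- ===== LEMMAS AND PROOFS =====

-- A's early-return odd-counting loop, characterised (entered only with count 0 or 1)
theorem pvALoop_eq (l : List Int) : ∀ c : Int, c = 0 ∨ c = 1 →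
    pvALoop l c = decide (c + (l.countP (fun v => !(PySem.Int.band v 1 == 0)) : Int) ≤ 1) := by
  induction l with
  | nil =>
    intro c hc; rcases hc with h | h <;> subst h <;> simp [pvALoop]
  | cons v vs ih =>
    intro c hc
    by_cases hv : PySem.Int.band v 1 = 0
    · rcases hc with h | h <;> subst h <;>
        simp only [pvALoop, ne_eq, hv, not_true_eq_false, if_false, List.countP_cons,
          beq_self_eq_true, Bool.not_true, Bool.false_eq_true, add_zero, zero_add] <;>
        rw [if_neg (by decide)]
      · rw [ih 0 (Or.inl rfl), zero_add]
      · exact ih 1 (Or.inr rfl)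
    · have hb : (!(PySem.Int.band v 1 == 0)) = true := by simp [hv]
      rcases hc with h | h <;> subst h <;>
        simp only [pvALoop, ne_eq, hv, not_false_eq_true, if_true, List.countP_cons, hb,
          zero_add]
      · rw [if_neg (by decide), ih 1 (Or.inr rfl), decide_eq_decide]
        push_cast; omega
      · rw [if_pos (by decide), eq_comm, decide_eq_false_iff_not]
        push_cast; omega

-- membership after one toggle
theorem mem_pvToggle (s : PySem.Set Int) (x y : Int) :
    y ∈ pvToggle s x ↔ ¬ (y ∈ s ↔ y = x) := by
  unfold pvToggle
  by_cases hx : x ∈ s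
  · rw [if_pos ((PySem.Set.contains_iff s x).mpr hx), PySem.Set.mem_discard]
    by_cases hyx : y = x
    · subst hyx; simp [hx]
    · simp [hyx]
  · rw [if_neg (by simp [hx]), PySem.Set.mem_add]
    by_cases hyx : y = x
    · subst hyx; simp [hx]
    · simp [hyx]

theorem nodup_pvToggle (s : PySem.Set Int) (x : Int) (hs : s.Nodup) :
    (pvToggle s x).Nodup := by
  unfold pvToggle
  split
  · exact PySem.Set.nodup_discard s x hs
  · exact PySem.Set.nodup_add s x hs

theorem nodup_fold_pvToggle (l : List Int) : ∀ s : PySem.Set Int, s.Nodup →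
    (l.foldl pvToggle s).Nodup := by
  induction l with
  | nil => intro s hs; exact hs
  | cons x xs ih => intro s hs; exact ih _ (nodup_pvToggle s x hs)

theorem mem_fold_pvToggle (l : List Int) : ∀ (s : PySem.Set Int) (y : Int),
    (y ∈ l.foldl pvToggle s) ↔ ¬ (y ∈ s ↔ l.count y % 2 = 1) := by
  induction l with
  | nil => intro s y; simp
  | cons x xs ih =>
    intro s y
    rw [List.foldl_cons, ih, List.count_cons]
    by_cases hyx : y = x
    · subst hyx
      rw [mem_pvToggle]
      simp only [beq_self_eq_true, if_true]
      have h2 : (xs.count y + 1) % 2 = 1 ↔ ¬ (xs.count y % 2 = 1) := by omega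
      rw [h2]; tauto
    · rw [mem_pvToggle]
      simp only [beq_iff_eq]
      rw [if_neg (fun h => hyx h.symm), add_zero]
      tauto

-- the parity set after the whole pass: exactly the keys with odd count
theorem mem_seen (path : List Int) (y : Int) :
    y ∈ path.foldl pvToggle PySem.Set.empty ↔ path.count y % 2 = 1 := by
  rw [mem_fold_pvToggle]
  simp [PySem.Set.empty]

-- the band-1 test on a counter value is the count's parity
theorem band_count (path : List Int) (k : Int) :
    (!(PySem.Int.band ((path.count k : Nat) : Int) 1 == 0)) = decide (path.count k % 2 = 1) := by
  rw [PySem.Int.band_one]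
  have : ((2 : Int)) = ((2 : Nat) : Int) := by norm_num
  rw [this, PySem.Int.mod_natCast]
  by_cases h : path.count k % 2 = 1
  · simp [h]
  · have h0 : path.count k % 2 = 0 := by omega
    simp [h0]

theorem seen_perm (path : List Int) :
    (path.foldl pvToggle PySem.Set.empty).Perm
      ((PySem.Set.ofList path).filter (fun k => decide (path.count k % 2 = 1))) := by
  rw [List.perm_ext_iff_of_nodup
      (nodup_fold_pvToggle path PySem.Set.empty List.nodup_nil)
      (List.Nodup.filter _ (PySem.Set.nodup_ofList path))]
  intro a
  rw [mem_seen, List.mem_filter, PySem.Set.mem_ofList]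
  constructor
  · intro h
    refine ⟨?_, by simpa using h⟩
    have : path.count a ≠ 0 := by omega
    exact List.count_pos_iff.mp (Nat.pos_of_ne_zero this)
  · intro ⟨_, h⟩; simpa using h

-- ===== VERDICT (by name: the statement is the Claim_ definition above) =====
theorem isFakePalindrome_spec : Claim_equal_isFakePalindrome := by
  intro path _
  unfold Spec_isFakePalindrome isFakePalindrome isFakePalindrome_alt
  rw [show (path.foldl (fun d i => d.modify i 0 (· + 1)) PySem.Dict.empty) = PySem.Dict.counter path from rfl]
  rw [pvALoop_eq _ 0 (Or.inl rfl)]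
  have hv : (PySem.Dict.counter path).values
      = (PySem.Set.ofList path).map (fun k => ((path.count k : Nat) : Int)) := by
    have := PySem.Dict.items_counter path
    calc (PySem.Dict.counter path).values
        = (PySem.Dict.counter path).items.map (·.2) := rfl
      _ = _ := by rw [this, List.map_map]; rfl
  rw [hv, List.countP_map]
  have hcp : (PySem.Set.ofList path).countP
        ((fun v => !(PySem.Int.band v 1 == 0)) ∘ fun k => ((path.count k : Nat) : Int))
      = ((PySem.Set.ofList path).filter (fun k => decide (path.count k % 2 = 1))).length := by
    rw [← List.countP_eq_length_filter]
    apply List.countP_congr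
    intro k _
    simp only [Function.comp]
    rw [band_count path k]
  rw [hcp, ← (seen_perm path).length_eq]
  rw [decide_eq_decide]
  simp only [PySem.Set.len]
  omega
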